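-- pv_equiv track=rewrite | github.com/S-SIRIUS/Programmers | 프로그래머스/2/250136. ［PCCP 기출문제］ 2번 ／ 석유 시추/［PCCP 기출문제］ 2번 ／ 석유 시추.py | solution
-- ===== SOURCE A (Python) =====
-- from collections import deque
--
-- dx=[-1, 1, 0, 0]
--
-- dy=[0, 0, 1, -1]
--
-- def bfs(x, y, n, m, land, visited, candidates, group):
--     queue = deque()
--     queue.append((x,y))
--     candidates.append((x,y))
--     visited[x][y]=group
--     count=1
--
--     while queue:
--         x, y = queue.popleft()
--         for i in range(4):
--             new_x = x+dx[i]
--             new_y = y+dy[i]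
--             if 0<=new_x<n and 0<=new_y<m and land[new_x][new_y]==1 and visited[new_x][new_y]==0:
--                 count+=1
--                 candidates.append((new_x, new_y))
--                 visited[new_x][new_y]=group
--                 queue.append((new_x, new_y))
--
--     return count, visited, candidates
--
-- def fill(count, filled, candidates):
--     for i, j in candidates:
--         filled[i][j]=count
--     return filled
--
-- def find(filled, n, m, visited):
--     answers=[]
--     for i in range(m):
--         s = set()
--         answer=0
--         for j in range(n):
--             if filled[j][i]!=0 and visited[j][i] not in s:
--                 s.add(visited[j][i])
--                 answer +=filled[j][i]
--         answers.append(answer)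
--     return max(answers)
--
-- def solution(land):
--     answer = 0
--     n = len(land)
--     m = len(land[0])
--     visited=[[0]*(m) for _ in range(n)]
--     filled=[[0]*(m) for _ in range(n)]
--     group=1
--     for i in range(n):
--         for j in range(m):
--             if land[i][j]==1 and visited[i][j]==0:
--                 candidates=[]
--                 count, visited, candidates = bfs(i,j, n, m,land, visited, candidates, group)
--                 filled = fill(count, filled, candidates)
--                 group+=1
--     answer = find(filled, n, m, visited)
--     return answer
-- ===== SOURCE B (Python) =====
-- def solution(land):
--     n, m = len(land), len(land[0])
--     visited = [[False] * m for _ in range(n)]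
--     col_sums = [0] * m
--     for i in range(n):
--         for j in range(m):
--             if land[i][j] == 1 and not visited[i][j]:
--                 # flood fill: grow `cells` in place, reading it with an index pointer
--                 cells = [(i, j)]
--                 visited[i][j] = True
--                 k = 0
--                 while k < len(cells):
--                     x, y = cells[k]
--                     k += 1
--                     for nx, ny in ((x - 1, y), (x + 1, y), (x, y + 1), (x, y - 1)):
--                         if 0 <= nx < n and 0 <= ny < m and land[nx][ny] == 1 and not visited[nx][ny]:
--                             visited[nx][ny] = True
--                             cells.append((nx, ny))
--                 # distribute this component's size over the distinct columns it occupies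
--                 size = len(cells)
--                 for c in dict.fromkeys(c for _, c in cells):
--                     col_sums[c] += size
--     return max(col_sums)
-- ===== Notes on version B (the rewrite author's own statement) =====
-- stated objective: simpler
-- what changed: B drops A's id/size grids (visited groups, filled) and the final per-column rescan that dedups component ids with a set; instead each flood-filled component's size is added once to col_sums[c] for each distinct column c it occupies, and the answer is max(col_sums); the BFS queue is also replaced by an index pointer into the growing cell list.
import Mathlib
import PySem

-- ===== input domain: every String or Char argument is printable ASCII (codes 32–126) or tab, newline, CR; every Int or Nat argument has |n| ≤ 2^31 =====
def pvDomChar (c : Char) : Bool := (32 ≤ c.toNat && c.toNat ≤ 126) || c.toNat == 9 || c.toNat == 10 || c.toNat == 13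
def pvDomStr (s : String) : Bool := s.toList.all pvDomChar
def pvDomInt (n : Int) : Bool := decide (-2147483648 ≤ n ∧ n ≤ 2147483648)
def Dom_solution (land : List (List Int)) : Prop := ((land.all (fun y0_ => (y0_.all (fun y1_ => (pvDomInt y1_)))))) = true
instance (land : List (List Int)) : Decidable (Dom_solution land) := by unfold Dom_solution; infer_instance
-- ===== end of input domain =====

-- B replaces A's end-of-run column scan (dedup of component ids per column) by distributing each
-- component's size over its distinct columns while flood-filling; objective: simpler decomposition.

-- ===== PORT A =====
-- shared 2-D grid primitives (Python g[x][y] read / g[x][y] = v write; exact at the call sites,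
-- where every index is guarded 0 ≤ x < len(g), 0 ≤ y < len(row) — out-of-range rows are excluded by Pre_)
def gridGetN {α : Type} (d : α) (g : List (List α)) (x y : Nat) : α := (g.getD x []).getD y d

def gridSetN {α : Type} : List (List α) → Nat → Nat → α → List (List α)
  | [], _, _, _ => []
  | r :: g, 0, y, v => r.set y v :: g
  | r :: g, x + 1, y, v => r :: gridSetN g x y v

def gget {α : Type} (d : α) (g : List (List α)) (x y : Int) : α := gridGetN d g x.toNat y.toNat

def gset {α : Type} (g : List (List α)) (x y : Int) (v : α) : List (List α) := gridSetN g x.toNat y.toNat v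

-- A's fill(count, filled, candidates): write v at every listed cell (generic in the written value)
def fillA {α : Type} (v : α) (g : List (List α)) (cs : List (Int × Int)) : List (List α) :=
  cs.foldl (fun f c => gset f c.1 c.2 v) g

-- one neighbour probe of A's bfs (body of 'for i in range(4)' for one (dx[i], dy[i]))
def stepA (n m : Int) (land : List (List Int)) (group x y dx dy : Int)
    (s : List (Int × Int) × List (List Int) × List (Int × Int) × Int) :
    List (Int × Int) × List (List Int) × List (Int × Int) × Int :=
  match s with
  | (queue, visited, candidates, count) =>
    let nx := x + dx
    let ny := y + dy
    if 0 ≤ nx ∧ nx < n ∧ 0 ≤ ny ∧ ny < m ∧ gget 0 land nx ny = 1 ∧ gget 0 visited nx ny = 0 then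
      (queue ++ [(nx, ny)], gset visited nx ny group, candidates ++ [(nx, ny)], count + 1)
    else (queue, visited, candidates, count)

-- A's 'while queue' loop; the deque is the list (popleft = head). One pop per fuel unit:
-- fuel n*m+1 always suffices, since at most one cell is enqueued per unvisited cell plus the start.
def loopA (n m : Int) (land : List (List Int)) (group : Int) :
    Nat → List (Int × Int) × List (List Int) × List (Int × Int) × Int →
    Int × List (List Int) × List (Int × Int)
  | 0, (_, visited, candidates, count) => (count, visited, candidates)
  | _ + 1, ([], visited, candidates, count) => (count, visited, candidates)
  | fuel + 1, ((x, y) :: queue, visited, candidates, count) =>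
      loopA n m land group fuel
        (stepA n m land group x y 0 (-1)
          (stepA n m land group x y 0 1
            (stepA n m land group x y 1 0
              (stepA n m land group x y (-1) 0 (queue, visited, candidates, count)))))

def bfsA (x y n m : Int) (land visited : List (List Int)) (candidates : List (Int × Int))
    (group : Int) : Int × List (List Int) × List (Int × Int) :=
  loopA n m land group (n.toNat * m.toNat + 1)
    ([(x, y)], gset visited x y group, candidates ++ [(x, y)], 1)

-- inner loop of A's find for one column i: state (s, answer)
def findColA (filled visited : List (List Int)) (n i : Int) : PySem.Set Int × Int :=
  (PySem.List.pyRange 0 n).foldl (fun st j =>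
    if gget 0 filled j i ≠ 0 ∧ PySem.Set.contains st.1 (gget 0 visited j i) = false then
      (PySem.Set.add st.1 (gget 0 visited j i), st.2 + gget 0 filled j i)
    else st) (PySem.Set.empty, 0)

def findA (filled : List (List Int)) (n m : Int) (visited : List (List Int)) : Int :=
  let answers := (PySem.List.pyRange 0 m).map (fun i => (findColA filled visited n i).2)
  (PySem.List.max? answers (fun x => x)).getD 0

def solution (land : List (List Int)) : Int :=
  let n : Int := land.length
  let m : Int := (PySem.List.pyGetD land 0 []).length
  let init : List (List Int) := List.replicate n.toNat (List.replicate m.toNat 0)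
  let fin := (PySem.List.pyRange 0 n).foldl (fun st i =>
      (PySem.List.pyRange 0 m).foldl (fun st j =>
        match st with
        | (visited, filled, group) =>
          if gget 0 land i j = 1 ∧ gget 0 visited i j = 0 then
            match bfsA i j n m land visited [] group with
            | (count, visited', candidates) => (visited', fillA count filled candidates, group + 1)
          else (visited, filled, group)) st) (init, init, 1)
  findA fin.2.1 n m fin.1

-- ===== PORT B =====
-- one neighbour probe of B's flood fill (one of the four (nx, ny) offsets)
def stepB (n m : Int) (land : List (List Int)) (x y dx dy : Int)
    (s : List (Int × Int) × List (List Bool)) : List (Int × Int) × List (List Bool) :=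
  match s with
  | (cells, visited) =>
    let nx := x + dx
    let ny := y + dy
    if 0 ≤ nx ∧ nx < n ∧ 0 ≤ ny ∧ ny < m ∧ gget 0 land nx ny = 1 ∧ gget false visited nx ny = false then
      (cells ++ [(nx, ny)], gset visited nx ny true)
    else (cells, visited)

-- B's 'while k < len(cells)' loop: read cells[k] (= head of cells.drop k), advance k
def loopB (n m : Int) (land : List (List Int)) :
    Nat → List (Int × Int) → Nat → List (List Bool) → List (Int × Int) × List (List Bool)
  | 0, cells, _, visited => (cells, visited)
  | fuel + 1, cells, k, visited =>
      match cells.drop k with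
      | [] => (cells, visited)
      | (x, y) :: _ =>
        match stepB n m land x y 0 (-1)
            (stepB n m land x y 0 1
              (stepB n m land x y 1 0
                (stepB n m land x y (-1) 0 (cells, visited)))) with
        | (cells', visited') => loopB n m land fuel cells' (k + 1) visited'

-- col_sums[c] += v
def bumpB (cols : List Int) (c v : Int) : List Int :=
  PySem.List.pySetD cols c (PySem.List.pyGetD cols c 0 + v)

def solution_alt (land : List (List Int)) : Int :=
  let n : Int := land.length
  let m : Int := (PySem.List.pyGetD land 0 []).length
  let fin := (PySem.List.pyRange 0 n).foldl (fun st i =>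
      (PySem.List.pyRange 0 m).foldl (fun st j =>
        match st with
        | (visited, cols) =>
          if gget 0 land i j = 1 ∧ gget false visited i j = false then
            match loopB n m land (n.toNat * m.toNat + 1) [(i, j)] 0 (gset visited i j true) with
            | (cells, visited') =>
              let size : Int := cells.length
              (visited',
                (PySem.List.dedup (cells.map (·.2))).foldl (fun cols c => bumpB cols c size) cols)
          else (visited, cols)) st)
    (List.replicate n.toNat (List.replicate m.toNat false), List.replicate m.toNat 0)
  (PySem.List.max? fin.2 (fun x => x)).getD 0

-- ===== PRECONDITION & SPEC =====
-- Pre_ excludes exactly the inputs on which Python A raises: land == [] (IndexError on land[0]),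
-- an empty first row (max([]) ValueError), or a row shorter than len(land[0]) (IndexError).
def Pre_solution (land : List (List Int)) : Prop :=
  land ≠ [] ∧ 0 < (PySem.List.pyGetD land 0 []).length ∧
    ∀ r ∈ land, (PySem.List.pyGetD land 0 []).length ≤ r.length
instance (land : List (List Int)) : Decidable (Pre_solution land) := by
  unfold Pre_solution; infer_instance

def pvWitness_solution : List (List Int) := [[1, 0], [1, 1]]

def Spec_solution (land : List (List Int)) (out : Int) : Prop := out = solution_alt land
instance (land : List (List Int)) (out : Int) : Decidable (Spec_solution land out) := by
  unfold Spec_solution; infer_instance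

-- ===== CLAIM (what is proved, stated in full; the proofs are below) =====
def Claim_equal_solution : Prop :=
  ∀ (land : List (List Int)), Dom_solution land → Pre_solution land →
    Spec_solution land (solution land)

-- ===== LEMMAS AND PROOFS =====

-- grid shape: n rows of length m
def GShape {α : Type} (g : List (List α)) (n m : Nat) : Prop :=
  g.length = n ∧ ∀ r ∈ g, r.length = m

-- a cell inside the n × m board
def InR (n m : Int) (p : Int × Int) : Prop := 0 ≤ p.1 ∧ p.1 < n ∧ 0 ≤ p.2 ∧ p.2 < m

-- B's Bool visited grid as the image of A's Int one
def relGrid (g : List (List Int)) : List (List Bool) := g.map (List.map (fun v => !(v == 0)))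

theorem getD_map' {α β : Type} (l : List α) (f : α → β) (i : Nat) (d : α) :
    (l.map f).getD i (f d) = f (l.getD i d) := by
  simp only [List.getD_eq_getElem?_getD, List.getElem?_map]
  cases l[i]? <;> simp

theorem gget_relGrid (g : List (List Int)) (x y : Int) :
    gget false (relGrid g) x y = !(gget 0 g x y == 0) := by
  unfold gget gridGetN relGrid
  have h1 : ([] : List Bool) = List.map (fun v : Int => !(v == 0)) [] := rfl
  rw [h1, getD_map']
  have h2 : false = (fun v : Int => !(v == 0)) 0 := rfl
  rw [h2, getD_map']

theorem relGrid_gridSetN (g : List (List Int)) (x y : Nat) (v : Int) :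
    relGrid (gridSetN g x y v) = gridSetN (relGrid g) x y (!(v == 0)) := by
  induction g generalizing x with
  | nil => rfl
  | cons r g ih =>
    cases x with
    | zero => simp [gridSetN, relGrid, List.map_set]
    | succ x => simpa [gridSetN, relGrid] using ih x

theorem relGrid_gset (g : List (List Int)) (x y : Int) (v : Int) :
    relGrid (gset g x y v) = gset (relGrid g) x y (!(v == 0)) :=
  relGrid_gridSetN g x.toNat y.toNat v

theorem length_gridSetN {α : Type} (g : List (List α)) (x y : Nat) (v : α) :
    (gridSetN g x y v).length = g.length := by
  induction g generalizing x with
  | nil => rfl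
  | cons r g ih => cases x <;> simp [gridSetN, ih]

theorem rows_gridSetN {α : Type} (g : List (List α)) (x y : Nat) (v : α) :
    ∀ r' ∈ gridSetN g x y v, ∃ r ∈ g, r'.length = r.length := by
  induction g generalizing x with
  | nil => simp [gridSetN]
  | cons r g ih =>
    cases x with
    | zero =>
      intro r' hr'
      rcases List.mem_cons.1 hr' with h | h
      · exact ⟨r, by simp, by simp [h]⟩
      · exact ⟨r', by simp [h], rfl⟩
    | succ x =>
      intro r' hr'
      rcases List.mem_cons.1 hr' with h | h
      · exact ⟨r, by simp, by simp [h]⟩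
      · obtain ⟨r0, hr0, hlen⟩ := ih x r' h
        exact ⟨r0, by simp [hr0], hlen⟩

theorem gshape_gridSetN {α : Type} {g : List (List α)} {n m : Nat} (h : GShape g n m)
    (x y : Nat) (v : α) : GShape (gridSetN g x y v) n m := by
  refine ⟨by rw [show (gridSetN g x y v).length = g.length from length_gridSetN g x y v]; exact h.1, ?_⟩
  intro r' hr'
  obtain ⟨r, hrg, hlen⟩ := rows_gridSetN g x y v r' hr'
  rw [hlen]; exact h.2 r hrg

theorem gridGetN_gridSetN {α : Type} {m : Nat} (d v : α) (g : List (List α))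
    (hsh : ∀ r ∈ g, r.length = m) {x y : Nat} (hx : x < g.length) (hy : y < m)
    (x' y' : Nat) :
    gridGetN d (gridSetN g x y v) x' y' = if x' = x ∧ y' = y then v else gridGetN d g x' y' := by
  induction g generalizing x x' with
  | nil => simp at hx
  | cons r g ih =>
    cases x with
    | zero =>
      cases x' with
      | zero =>
        have hylen : y < r.length := by rw [hsh r (by simp)]; exact hy
        simp only [gridSetN, gridGetN, List.getD_cons_zero]
        by_cases h : y' = y
        · subst h; simp [List.getD_eq_getElem?_getD, hylen]
        · simp [List.getD_eq_getElem?_getD, Ne.symm h, h]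
      | succ x' => simp [gridSetN, gridGetN]
    | succ x =>
      cases x' with
      | zero => simp [gridSetN, gridGetN]
      | succ x' =>
        have := ih (fun r' h' => hsh r' (by simp [h'])) (by simpa using hx) x'
        simpa [gridSetN, gridGetN] using this

theorem gget_gset {α : Type} {n m : Nat} (d v : α) (g : List (List α)) (hsh : GShape g n m)
    {x y : Int} (hx : 0 ≤ x) (hxn : x < (n : Int)) (hy : 0 ≤ y) (hym : y < (m : Int))
    {x' y' : Int} (hx' : 0 ≤ x') (hy' : 0 ≤ y') :
    gget d (gset g x y v) x' y' = if x' = x ∧ y' = y then v else gget d g x' y' := by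
  have hxl : x.toNat < g.length := by rw [hsh.1]; omega
  have hyl : y.toNat < m := by omega
  have := gridGetN_gridSetN d v g hsh.2 hxl hyl x'.toNat y'.toNat
  unfold gget gset
  rw [this]
  congr 1
  simp only [eq_iff_iff]
  omega

theorem gshape_fillA {α : Type} {n m : Nat} (v : α) {g : List (List α)} (h : GShape g n m)
    (cs : List (Int × Int)) : GShape (fillA v g cs) n m := by
  induction cs generalizing g with
  | nil => exact h
  | cons c cs ih => exact ih (gshape_gridSetN h _ _ _)

theorem fillA_append {α : Type} (v : α) (g : List (List α)) (cs : List (Int × Int)) (p : Int × Int) :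
    fillA v g (cs ++ [p]) = gset (fillA v g cs) p.1 p.2 v := by
  simp [fillA, List.foldl_append]

theorem fillA_cons {α : Type} (v : α) (g : List (List α)) (c : Int × Int) (cs : List (Int × Int)) :
    fillA v g (c :: cs) = fillA v (gset g c.1 c.2 v) cs := rfl

theorem relGrid_fillA (v : Int) (g : List (List Int)) (cs : List (Int × Int)) :
    relGrid (fillA v g cs) = fillA (!(v == 0)) (relGrid g) cs := by
  induction cs generalizing g with
  | nil => rfl
  | cons c cs ih => rw [fillA_cons, fillA_cons, ih, relGrid_gset]

theorem gget_fillA {α : Type} {n m : Nat} (d v : α) {g : List (List α)} (hsh : GShape g n m)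
    {cs : List (Int × Int)} (hcs : ∀ p ∈ cs, InR (n : Int) (m : Int) p)
    {x' y' : Int} (hx' : 0 ≤ x') (hy' : 0 ≤ y') :
    gget d (fillA v g cs) x' y' = if (x', y') ∈ cs then v else gget d g x' y' := by
  induction cs generalizing g with
  | nil => simp [fillA]
  | cons c cs ih =>
    obtain ⟨h1, h2, h3, h4⟩ := hcs c (by simp)
    have hstep := gget_gset d v g hsh h1 h2 h3 h4 hx' hy'
    rw [fillA_cons, ih (show GShape (gset g c.1 c.2 v) n m from gshape_gridSetN hsh _ _ _) (fun p hp => hcs p (by simp [hp]))]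
    by_cases hmem : (x', y') ∈ cs
    · simp [hmem]
    · rw [if_neg hmem, hstep]
      by_cases he : (x', y') = c
      · have h1' : x' = c.1 ∧ y' = c.2 := ⟨congrArg Prod.fst he, congrArg Prod.snd he⟩
        simp [h1']
      · have hne : ¬(x' = c.1 ∧ y' = c.2) := fun hh => he (Prod.ext hh.1 hh.2)
        simp [List.mem_cons, hmem, he, hne]

-- all-zero starting grids
theorem gget_zero {α : Type} (d : α) (n m : Nat) (x y : Int) :
    gget d (List.replicate n (List.replicate m d)) x y = d := by
  unfold gget gridGetN
  rcases lt_or_ge x.toNat n with h | h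
  · rw [List.getD_replicate _ h]
    rcases lt_or_ge y.toNat m with h' | h'
    · rw [List.getD_replicate _ h']
    · exact List.getD_eq_default _ d (by simpa using h')
  · rw [List.getD_eq_default _ [] (by simpa using h)]
    exact List.getD_eq_default _ d (by simp)

-- ===== BFS simulation: A's deque loop and B's index-pointer loop discover the same cells =====

theorem step_sim {n m : Nat} (land : List (List Int)) {group : Int} (hg : 1 ≤ group)
    {visA0 : List (List Int)} (hsh0 : GShape visA0 n m) (x y dx dy : Int)
    {cs : List (Int × Int)} {k : Nat} (hk : k ≤ cs.length)
    (hcs : ∀ p ∈ cs, InR (n : Int) (m : Int) p) (hnd : cs.Nodup)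
    (h0 : ∀ p ∈ cs, gget 0 visA0 p.1 p.2 = 0) :
    ∃ cs' : List (Int × Int),
      stepA (n : Int) (m : Int) land group x y dx dy
          (cs.drop k, fillA group visA0 cs, cs, (cs.length : Int))
        = (cs'.drop k, fillA group visA0 cs', cs', (cs'.length : Int))
      ∧ stepB (n : Int) (m : Int) land x y dx dy (cs, fillA true (relGrid visA0) cs)
        = (cs', fillA true (relGrid visA0) cs')
      ∧ cs <+: cs'
      ∧ (∀ p ∈ cs', InR (n : Int) (m : Int) p) ∧ cs'.Nodup
      ∧ (∀ p ∈ cs', gget 0 visA0 p.1 p.2 = 0) ∧ k ≤ cs'.length := by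
  have hgz : (!((group : Int) == 0)) = true := by
    have : group ≠ 0 := by omega
    simp [this]
  have hB : fillA true (relGrid visA0) cs = relGrid (fillA group visA0 cs) := by
    rw [relGrid_fillA, hgz]
  have hBB : ∀ a b : Int, gget false (fillA true (relGrid visA0) cs) a b
      = !(gget 0 (fillA group visA0 cs) a b == 0) := by
    intro a b; rw [hB, gget_relGrid]
  set nx := x + dx with hnx
  set ny := y + dy with hny
  have hiff : (0 ≤ nx ∧ nx < (n : Int) ∧ 0 ≤ ny ∧ ny < (m : Int) ∧ gget 0 land nx ny = 1 ∧
        gget false (fillA true (relGrid visA0) cs) nx ny = false)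
      ↔ (0 ≤ nx ∧ nx < (n : Int) ∧ 0 ≤ ny ∧ ny < (m : Int) ∧ gget 0 land nx ny = 1 ∧
        gget 0 (fillA group visA0 cs) nx ny = 0) := by
    rw [hBB]
    simp
  by_cases hga : 0 ≤ nx ∧ nx < (n : Int) ∧ 0 ≤ ny ∧ ny < (m : Int) ∧ gget 0 land nx ny = 1 ∧
      gget 0 (fillA group visA0 cs) nx ny = 0
  · obtain ⟨hb1, hb2, hb3, hb4, _, hv0⟩ := hga
    have hval := gget_fillA (0 : Int) group hsh0 hcs hb1 hb3 (x' := nx) (y' := ny)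
    rw [hv0] at hval
    have hnotmem : (nx, ny) ∉ cs := by
      intro hmem
      rw [if_pos hmem] at hval
      omega
    have hvis0 : gget 0 visA0 nx ny = 0 := by rw [if_neg hnotmem] at hval; exact hval.symm
    refine ⟨cs ++ [(nx, ny)], ?_, ?_, List.prefix_append cs _, ?_, ?_, ?_, ?_⟩
    · show stepA _ _ _ _ _ _ _ _ _ = _
      simp only [stepA]
      rw [if_pos (by exact ⟨hb1, hb2, hb3, hb4, ‹gget 0 land nx ny = 1›, hv0⟩)]
      refine congrArg₂ _ (List.drop_append_of_le_length hk).symm ?_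
      refine congrArg₂ _ (fillA_append group visA0 cs (nx, ny)).symm ?_
      refine congrArg₂ _ rfl ?_
      push_cast [List.length_append]
      simp
    · show stepB _ _ _ _ _ _ _ _ = _
      simp only [stepB]
      rw [if_pos (by
        refine (hiff.mpr ⟨hb1, hb2, hb3, hb4, ‹gget 0 land nx ny = 1›, hv0⟩))]
      exact congrArg₂ _ rfl (fillA_append true (relGrid visA0) cs (nx, ny)).symm
    · intro p hp
      rcases List.mem_append.1 hp with hp | hp
      · exact hcs p hp
      · have : p = (nx, ny) := by simpa using hp
        subst this; exact ⟨hb1, hb2, hb3, hb4⟩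
    · rw [List.nodup_append]
      refine ⟨hnd, by simp, ?_⟩
      intro p hp q hq
      have hqe : q = (nx, ny) := by simpa using hq
      rw [hqe]
      intro hpq
      rw [hpq] at hp
      exact hnotmem hp
    · intro p hp
      rcases List.mem_append.1 hp with hp | hp
      · exact h0 p hp
      · have : p = (nx, ny) := by simpa using hp
        subst this; exact hvis0
    · simp; omega
  · refine ⟨cs, ?_, ?_, List.prefix_refl cs, hcs, hnd, h0, hk⟩
    · show stepA _ _ _ _ _ _ _ _ _ = _
      simp only [stepA]
      rw [if_neg hga]
    · show stepB _ _ _ _ _ _ _ _ = _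
      simp only [stepB]
      rw [if_neg (fun h => hga (hiff.mp h))]

theorem loop_sim {n m : Nat} (land : List (List Int)) {group : Int} (hg : 1 ≤ group)
    {visA0 : List (List Int)} (hsh0 : GShape visA0 n m) (fuel : Nat) :
    ∀ (cs : List (Int × Int)) (k : Nat), k ≤ cs.length →
      (∀ p ∈ cs, InR (n : Int) (m : Int) p) → cs.Nodup →
      (∀ p ∈ cs, gget 0 visA0 p.1 p.2 = 0) →
      ∃ cs' : List (Int × Int),
        loopA (n : Int) (m : Int) land group fuel
            (cs.drop k, fillA group visA0 cs, cs, (cs.length : Int))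
          = ((cs'.length : Int), fillA group visA0 cs', cs')
        ∧ loopB (n : Int) (m : Int) land fuel cs k (fillA true (relGrid visA0) cs)
          = (cs', fillA true (relGrid visA0) cs')
        ∧ cs <+: cs'
        ∧ (∀ p ∈ cs', InR (n : Int) (m : Int) p) ∧ cs'.Nodup
        ∧ (∀ p ∈ cs', gget 0 visA0 p.1 p.2 = 0) := by
  induction fuel with
  | zero =>
    intro cs k _ hcs hnd h0
    exact ⟨cs, rfl, rfl, List.prefix_refl cs, hcs, hnd, h0⟩
  | succ fuel ih =>
    intro cs k hk hcs hnd h0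
    cases hdrop : cs.drop k with
    | nil =>
      refine ⟨cs, rfl, ?_, List.prefix_refl cs, hcs, hnd, h0⟩
      simp only [loopB, hdrop]
    | cons hd rest =>
      obtain ⟨hx, hy⟩ := hd
      have hk1 : k + 1 ≤ cs.length := by
        have h2 : ¬ cs.length ≤ k := by
          intro hle
          rw [List.drop_eq_nil_iff.2 hle] at hdrop
          simp at hdrop
        omega
      have hrest : rest = cs.drop (k + 1) := by
        have h1 : (cs.drop k).tail = rest := by rw [hdrop]; rfl
        rw [List.tail_drop] at h1
        exact h1.symm
      obtain ⟨cs₁, eA1, eB1, p1, hcs1, hnd1, h01, hk11⟩ :=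
        step_sim land hg hsh0 hx hy (-1) 0 hk1 hcs hnd h0
      obtain ⟨cs₂, eA2, eB2, p2, hcs2, hnd2, h02, hk12⟩ :=
        step_sim land hg hsh0 hx hy 1 0 hk11 hcs1 hnd1 h01
      obtain ⟨cs₃, eA3, eB3, p3, hcs3, hnd3, h03, hk13⟩ :=
        step_sim land hg hsh0 hx hy 0 1 hk12 hcs2 hnd2 h02
      obtain ⟨cs₄, eA4, eB4, p4, hcs4, hnd4, h04, hk14⟩ :=
        step_sim land hg hsh0 hx hy 0 (-1) hk13 hcs3 hnd3 h03
      obtain ⟨cs', eA, eB, p', hcs', hnd', h0'⟩ := ih cs₄ (k + 1) hk14 hcs4 hnd4 h04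
      refine ⟨cs', ?_, ?_, ?_, hcs', hnd', h0'⟩
      · simp only [loopA]
        rw [hrest, eA1, eA2, eA3, eA4, eA]
      · simp only [loopB, hdrop]
        rw [eB1, eB2, eB3, eB4]
        exact eB
      · exact ((p1.trans p2).trans ((p3.trans p4))).trans p'

-- ===== the column accumulators =====

def colAcc (filled visited : List (List Int)) (n i : Int) : Int := (findColA filled visited n i).2

-- adding one component (written as cnt into filled, group into visited, at cells cs)
-- changes A's column scan by cnt exactly on the columns the component touches
theorem scanDelta {n m : Nat} {group cnt : Int} (hcnt : cnt ≠ 0)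
    {filled visA : List (List Int)} (hshF : GShape filled n m) (hshV : GShape visA n m)
    {cs : List (Int × Int)} (hcs : ∀ p ∈ cs, InR (n : Int) (m : Int) p)
    (hnew : ∀ p ∈ cs, gget 0 visA p.1 p.2 = 0)
    (hold : ∀ x y : Int, 0 ≤ x → x < (n : Int) → 0 ≤ y → y < (m : Int) →
      0 ≤ gget 0 visA x y ∧ gget 0 visA x y < group ∧ (gget 0 filled x y = 0 ↔ gget 0 visA x y = 0))
    {c : Int} (hc0 : 0 ≤ c) (hcm : c < (m : Int)) :
    colAcc (fillA cnt filled cs) (fillA group visA cs) (n : Int) c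
      = colAcc filled visA (n : Int) c + (if ∃ p ∈ cs, p.2 = c then cnt else 0) := by
  have hcont : ∀ (s : PySem.Set Int) (v : Int),
      PySem.Set.contains s v = false ↔ v ∉ s := by
    intro s v
    rw [← PySem.Set.contains_iff s v]
    cases PySem.Set.contains s v <;> simp
  have hFn : ∀ j : Int, 0 ≤ j → gget 0 (fillA cnt filled cs) j c
      = if (j, c) ∈ cs then cnt else gget 0 filled j c := fun j hj =>
    gget_fillA 0 cnt hshF hcs hj hc0
  have hVn : ∀ j : Int, 0 ≤ j → gget 0 (fillA group visA cs) j c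
      = if (j, c) ∈ cs then group else gget 0 visA j c := fun j hj =>
    gget_fillA 0 group hshV hcs hj hc0
  have key : ∀ (L : List Int), (∀ j ∈ L, 0 ≤ j ∧ j < (n : Int)) →
      ∀ (s s' : PySem.Set Int) (a : Int) (b : Bool),
      (∀ v : Int, v ∈ s' ↔ v ∈ s ∨ (b = true ∧ v = group)) →
      (∀ v ∈ s, v ≠ group) →
      (L.foldl (fun st j =>
          if gget 0 (fillA cnt filled cs) j c ≠ 0 ∧
              PySem.Set.contains st.1 (gget 0 (fillA group visA cs) j c) = false then
            (PySem.Set.add st.1 (gget 0 (fillA group visA cs) j c),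
              st.2 + gget 0 (fillA cnt filled cs) j c)
          else st) (s', a + (if b then cnt else 0))).2
        = (L.foldl (fun st j =>
            if gget 0 filled j c ≠ 0 ∧
                PySem.Set.contains st.1 (gget 0 visA j c) = false then
              (PySem.Set.add st.1 (gget 0 visA j c), st.2 + gget 0 filled j c)
            else st) (s, a)).2
          + (if (b = true ∨ ∃ p ∈ cs, p.1 ∈ L ∧ p.2 = c) then cnt else 0) := by
    intro L
    induction L with
    | nil =>
      intro _ s s' a b _ _
      simp only [List.foldl_nil]
      by_cases hb : b = true <;> simp [hb]
    | cons j L ihL =>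
      intro hL s s' a b hmem hs
      obtain ⟨hj0, hjn⟩ := hL j (by simp)
      have hLr : ∀ j ∈ L, 0 ≤ j ∧ j < (n : Int) := fun j hj => hL j (by simp [hj])
      simp only [List.foldl_cons]
      rw [hFn j hj0, hVn j hj0]
      by_cases hjc : (j, c) ∈ cs
      · -- a freshly written cell: the old scan skips it (old filled = 0)
        have hV0 : gget 0 visA j c = 0 := hnew (j, c) hjc
        have hF0 : gget 0 filled j c = 0 :=
          ((hold j c hj0 hjn hc0 hcm).2.2).mpr hV0
        rw [if_pos hjc, if_pos hjc, hF0]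
        have hcond : ¬((0 : Int) ≠ 0 ∧
            PySem.Set.contains s (gget 0 visA j c) = false) := by simp
        rw [if_neg hcond]
        have hex : (b = true ∨ ∃ p ∈ cs, p.1 ∈ j :: L ∧ p.2 = c)
            ↔ (true = true ∨ ∃ p ∈ cs, p.1 ∈ L ∧ p.2 = c) := by
          simp only [true_or, iff_true]
          right
          exact ⟨(j, c), hjc, by simp⟩
        cases b with
        | true =>
          have hgin : group ∈ s' := (hmem group).mpr (Or.inr ⟨rfl, rfl⟩)
          have : ¬(cnt ≠ 0 ∧ PySem.Set.contains s' group = false) := by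
            intro ⟨_, h2⟩
            exact (hcont s' group).mp h2 hgin
          rw [if_neg this]
          rw [ihL hLr s s' a true hmem hs]
          rw [if_pos (by exact Or.inl rfl)]
          rw [if_pos (hex.mpr (Or.inl rfl))]
        | false =>
          have hgnin : group ∉ s' := by
            intro hgin
            rcases (hmem group).mp hgin with h | h
            · exact hs group h rfl
            · simp at h
          have : (cnt ≠ 0 ∧ PySem.Set.contains s' group = false) :=
            ⟨hcnt, (hcont s' group).mpr hgnin⟩
          rw [if_pos this]
          have hmem' : ∀ v : Int, v ∈ PySem.Set.add s' group ↔
              v ∈ s ∨ (true = true ∧ v = group) := by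
            intro v
            rw [PySem.Set.mem_add, hmem v]
            simp
          have heq : a + (if false then cnt else 0) + cnt
              = a + (if true then cnt else 0) := by simp
          rw [heq]
          rw [ihL hLr s (PySem.Set.add s' group) a true hmem' hs]
          rw [if_pos (by exact Or.inl rfl), if_pos (hex.mpr (Or.inl rfl))]
      · -- an untouched cell: both scans see the same values
        rw [if_neg hjc, if_neg hjc]
        have hex : (b = true ∨ ∃ p ∈ cs, p.1 ∈ j :: L ∧ p.2 = c)
            ↔ (b = true ∨ ∃ p ∈ cs, p.1 ∈ L ∧ p.2 = c) := by
          constructor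
          · rintro (h | ⟨p, hp, hp1, hp2⟩)
            · exact Or.inl h
            · rcases List.mem_cons.1 hp1 with h1 | h1
              · exfalso
                have : p = (j, c) := Prod.ext h1 hp2
                rw [this] at hp
                exact hjc hp
              · exact Or.inr ⟨p, hp, h1, hp2⟩
          · rintro (h | ⟨p, hp, hp1, hp2⟩)
            · exact Or.inl h
            · exact Or.inr ⟨p, hp, by simp [hp1], hp2⟩
        set F := gget 0 filled j c with hF
        set V := gget 0 visA j c with hV
        by_cases hFz : F ≠ 0
        · have hVlt : V < group := (hold j c hj0 hjn hc0 hcm).2.1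
          have hVne : V ≠ group := by omega
          have hVmem : V ∈ s' ↔ V ∈ s := by
            rw [hmem V]
            constructor
            · rintro (h | ⟨_, h⟩)
              · exact h
              · exact absurd h hVne
            · exact Or.inl
          by_cases hVin : V ∈ s
          · have h1 : ¬(F ≠ 0 ∧ PySem.Set.contains s V = false) := by
              intro ⟨_, h2⟩; exact (hcont s V).mp h2 hVin
            have h2 : ¬(F ≠ 0 ∧ PySem.Set.contains s' V = false) := by
              intro ⟨_, h2⟩; exact (hcont s' V).mp h2 (hVmem.mpr hVin)
            rw [if_neg h1, if_neg h2]
            rw [ihL hLr s s' a b hmem hs]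
            congr 1
            exact if_congr hex.symm rfl rfl
          · have h1 : (F ≠ 0 ∧ PySem.Set.contains s V = false) :=
              ⟨hFz, (hcont s V).mpr hVin⟩
            have h2 : (F ≠ 0 ∧ PySem.Set.contains s' V = false) :=
              ⟨hFz, (hcont s' V).mpr (fun h => hVin (hVmem.mp h))⟩
            rw [if_pos h1, if_pos h2]
            have hmem' : ∀ v : Int, v ∈ PySem.Set.add s' V ↔
                v ∈ PySem.Set.add s V ∨ (b = true ∧ v = group) := by
              intro v
              rw [PySem.Set.mem_add, PySem.Set.mem_add, hmem v]
              tauto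
            have hs' : ∀ v ∈ PySem.Set.add s V, v ≠ group := by
              intro v hv
              rcases (PySem.Set.mem_add s V v).mp hv with h | h
              · exact hs v h
              · rw [h]; exact hVne
            have heq : a + (if b then cnt else 0) + F
                = (a + F) + (if b then cnt else 0) := by ring
            rw [heq]
            rw [ihL hLr (PySem.Set.add s V) (PySem.Set.add s' V) (a + F) b hmem' hs']
            congr 1
            exact if_congr hex.symm rfl rfl
        · simp only [ne_eq, not_not] at hFz
          rw [hFz]
          have h1 : ¬((0 : Int) ≠ 0 ∧ PySem.Set.contains s V = false) := by simp
          have h2 : ¬((0 : Int) ≠ 0 ∧ PySem.Set.contains s' V = false) := by simp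
          rw [if_neg h1, if_neg h2]
          rw [ihL hLr s s' a b hmem hs]
          congr 1
          exact if_congr hex.symm rfl rfl
  unfold colAcc findColA
  have happ := key (PySem.List.pyRange 0 (n : Int))
    (fun j hj => by
      have := PySem.List.mem_pyRange_one.mp hj
      exact this)
    PySem.Set.empty PySem.Set.empty 0 false
    (by intro v; simp [PySem.Set.empty])
    (by intro v hv; simp [PySem.Set.empty] at hv)
  simp only [if_neg (by simp : ¬(false = true)), add_zero] at happ
  rw [happ]
  congr 1
  have : (false = true ∨ ∃ p ∈ cs, p.1 ∈ PySem.List.pyRange 0 (n : Int) ∧ p.2 = c)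
      ↔ (∃ p ∈ cs, p.2 = c) := by
    constructor
    · rintro (h | ⟨p, hp, _, hp2⟩)
      · simp at h
      · exact ⟨p, hp, hp2⟩
    · rintro ⟨p, hp, hp2⟩
      obtain ⟨h1, h2, _, _⟩ := hcs p hp
      exact Or.inr ⟨p, hp, PySem.List.mem_pyRange_one.mpr ⟨h1, h2⟩, hp2⟩
  rw [if_congr this rfl rfl]

-- B's bump fold over the deduplicated column list
theorem bump_fold {m : Nat} (size : Int) (ds : List Int) (hnd : ds.Nodup)
    (hds : ∀ d ∈ ds, 0 ≤ d ∧ d < (m : Int)) :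
    ∀ (cols : List Int), cols.length = m →
      (ds.foldl (fun cols c => bumpB cols c size) cols).length = m ∧
      ∀ c : Nat, c < m →
        (ds.foldl (fun cols c => bumpB cols c size) cols).getD c 0
          = cols.getD c 0 + (if ((c : Int) ∈ ds) then size else 0) := by
  induction ds with
  | nil => intro cols hlen; exact ⟨hlen, by simp⟩
  | cons d ds ih =>
    intro cols hlen
    obtain ⟨hd0, hdm⟩ := hds d (by simp)
    have hset : bumpB cols d size = cols.set d.toNat (cols.getD d.toNat 0 + size) := by
      unfold bumpB
      rw [PySem.List.pyGetD_of_nonneg cols 0 hd0, PySem.List.pySetD_of_nonneg cols _ hd0]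
    have hlen' : (bumpB cols d size).length = m := by
      rw [hset, List.length_set, hlen]
    obtain ⟨ihlen, ihget⟩ := ih (List.Nodup.of_cons hnd)
      (fun d' hd' => hds d' (by simp [hd'])) (bumpB cols d size) hlen'
    refine ⟨by simpa using ihlen, ?_⟩
    intro c hc
    rw [List.foldl_cons, ihget c hc]
    have hgetset : (bumpB cols d size).getD c 0
        = if c = d.toNat then cols.getD d.toNat 0 + size else cols.getD c 0 := by
      rw [hset, List.getD_eq_getElem?_getD, List.getElem?_set]
      have hdlt : d.toNat < cols.length := by rw [hlen]; omega
      by_cases hcd : c = d.toNat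
      · rw [if_pos hcd.symm, if_pos hdlt, if_pos hcd]
        rfl
      · rw [if_neg (fun h => hcd h.symm), if_neg hcd, ← List.getD_eq_getElem?_getD]
    rw [hgetset]
    by_cases hcd : c = d.toNat
    · have hcde : (c : Int) = d := by omega
      have hnin : (c : Int) ∉ ds := by
        rw [hcde]
        exact (List.nodup_cons.1 hnd).1
      rw [if_pos hcd, if_neg hnin, if_pos (by simp [hcde]), hcd]
      ring
    · have hcde : (c : Int) ≠ d := by omega
      rw [if_neg hcd]
      by_cases hmem : (c : Int) ∈ ds
      · rw [if_pos hmem, if_pos (by simp [hmem])]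
      · rw [if_neg hmem, if_neg (by simp [hcde, hmem])]

-- scan over all-zero grids yields 0
theorem colAcc_zero (n m : Nat) (nI i : Int) :
    colAcc (List.replicate n (List.replicate m 0)) (List.replicate n (List.replicate m 0)) nI i
      = 0 := by
  unfold colAcc findColA
  suffices h : ∀ (L : List Int) (st : PySem.Set Int × Int),
      L.foldl (fun st j =>
        if gget 0 (List.replicate n (List.replicate m (0:Int))) j i ≠ 0 ∧
            PySem.Set.contains st.1
              (gget 0 (List.replicate n (List.replicate m (0:Int))) j i) = false then
          (PySem.Set.add st.1 (gget 0 (List.replicate n (List.replicate m (0:Int))) j i),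
            st.2 + gget 0 (List.replicate n (List.replicate m (0:Int))) j i)
        else st) st = st by
    rw [h]
  intro L
  induction L with
  | nil => intro st; rfl
  | cons j L ih => intro st; rw [List.foldl_cons]; simp only [gget_zero]; simpa using ih st

-- ===== the paired outer loop =====

def LoopInv (n m : Nat) (stA : List (List Int) × List (List Int) × Int)
    (stB : List (List Bool) × List Int) : Prop :=
  GShape stA.1 n m ∧ GShape stA.2.1 n m ∧ stB.1 = relGrid stA.1 ∧ 1 ≤ stA.2.2 ∧
  (∀ x y : Int, 0 ≤ x → x < (n : Int) → 0 ≤ y → y < (m : Int) →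
    0 ≤ gget 0 stA.1 x y ∧ gget 0 stA.1 x y < stA.2.2 ∧
      (gget 0 stA.2.1 x y = 0 ↔ gget 0 stA.1 x y = 0)) ∧
  stB.2.length = m ∧
  (∀ c : Nat, c < m → stB.2.getD c 0 = colAcc stA.2.1 stA.1 (n : Int) (c : Int))

theorem foldl_rel {α β γ : Type} (R : α → β → Prop) (f : α → γ → α) (g : β → γ → β)
    (L : List γ) (h : ∀ a b x, x ∈ L → R a b → R (f a x) (g b x)) :
    ∀ a b, R a b → R (L.foldl f a) (L.foldl g b) := by
  induction L with
  | nil => intro a b hab; exact hab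
  | cons x L ih =>
    intro a b hab
    exact ih (fun a b y hy => h a b y (by simp [hy])) _ _ (h a b x (by simp) hab)

theorem loopInv_intro {n m : Nat} {visA filled : List (List Int)} {group : Int}
    {visB : List (List Bool)} {cols : List Int}
    (h1 : GShape visA n m) (h2 : GShape filled n m) (h3 : visB = relGrid visA)
    (h4 : 1 ≤ group)
    (h5 : ∀ x y : Int, 0 ≤ x → x < (n : Int) → 0 ≤ y → y < (m : Int) →
      0 ≤ gget 0 visA x y ∧ gget 0 visA x y < group ∧
        (gget 0 filled x y = 0 ↔ gget 0 visA x y = 0))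
    (h6 : cols.length = m)
    (h7 : ∀ c : Nat, c < m → cols.getD c 0 = colAcc filled visA (n : Int) (c : Int)) :
    LoopInv n m (visA, filled, group) (visB, cols) :=
  ⟨h1, h2, h3, h4, h5, h6, h7⟩

theorem body_step {n m : Nat} (land : List (List Int)) {i j : Int}
    (hi0 : 0 ≤ i) (hin : i < (n : Int)) (hj0 : 0 ≤ j) (hjm : j < (m : Int))
    (visA filled : List (List Int)) (group : Int) (visB : List (List Bool)) (cols : List Int)
    (h : LoopInv n m (visA, filled, group) (visB, cols)) :
    LoopInv n m
      (if gget 0 land i j = 1 ∧ gget 0 visA i j = 0 then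
        match bfsA i j (n : Int) (m : Int) land visA [] group with
        | (count, visited', candidates) => (visited', fillA count filled candidates, group + 1)
      else (visA, filled, group))
      (if gget 0 land i j = 1 ∧ gget false visB i j = false then
        match loopB (n : Int) (m : Int) land (n * m + 1) [(i, j)] 0 (gset visB i j true) with
        | (cells, visited') =>
          (visited',
            (PySem.List.dedup (cells.map (·.2))).foldl
              (fun cols c => bumpB cols c ((cells.length : Int))) cols)
      else (visB, cols)) := by
  obtain ⟨hshV, hshF, hrelB, hg, hvals, hclen, hcols⟩ := h
  simp only at hshV hshF hrelB hg hvals hclen hcols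
  have hgiff : (gget false visB i j = false) ↔ (gget 0 visA i j = 0) := by
    rw [hrelB, gget_relGrid]
    simp
  by_cases hguard : gget 0 land i j = 1 ∧ gget 0 visA i j = 0
  · rw [if_pos hguard, if_pos ⟨hguard.1, hgiff.mpr hguard.2⟩]
    obtain ⟨cs', eqA, eqB, hpre, hcs', hnd', h0'⟩ :=
      loop_sim land hg hshV (n * m + 1) [(i, j)] 0 (by simp)
        (by intro p hp
            have : p = (i, j) := by simpa using hp
            rw [this]; exact ⟨hi0, hin, hj0, hjm⟩)
        (by simp)
        (by intro p hp
            have : p = (i, j) := by simpa using hp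
            rw [this]; exact hguard.2)
    have hne : cs' ≠ [] := by
      intro hnil
      rw [hnil] at hpre
      have := hpre.length_le
      simp at this
    have hcntne : ((cs'.length : Int)) ≠ 0 := by
      have : cs'.length ≠ 0 := fun hz => hne (List.eq_nil_of_length_eq_zero hz)
      omega
    have hstartA : bfsA i j (n : Int) (m : Int) land visA [] group
        = ((cs'.length : Int), fillA group visA cs', cs') := by
      unfold bfsA
      have : ([(i, j)] : List (Int × Int)).drop 0 = [(i, j)] := rfl
      rw [← eqA]
      rfl
    have hstartB : loopB (n : Int) (m : Int) land (n * m + 1) [(i, j)] 0 (gset visB i j true)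
        = (cs', fillA true (relGrid visA) cs') := by
      rw [hrelB, ← eqB]
      rfl
    rw [hstartA, hstartB]
    show LoopInv n m (fillA group visA cs', fillA ((cs'.length : Int)) filled cs', group + 1)
      (fillA true (relGrid visA) cs',
        (PySem.List.dedup (cs'.map (·.2))).foldl
          (fun cols c => bumpB cols c ((cs'.length : Int))) cols)
    have hgz : (!((group : Int) == 0)) = true := by
      have : group ≠ 0 := by omega
      simp [this]
    have hrel' : fillA true (relGrid visA) cs' = relGrid (fillA group visA cs') := by
      rw [relGrid_fillA, hgz]
    have hgetV : ∀ x y : Int, 0 ≤ x → 0 ≤ y →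
        gget 0 (fillA group visA cs') x y = if (x, y) ∈ cs' then group else gget 0 visA x y :=
      fun x y hx hy => gget_fillA 0 group hshV hcs' hx hy
    have hgetF : ∀ x y : Int, 0 ≤ x → 0 ≤ y →
        gget 0 (fillA ((cs'.length : Int)) filled cs') x y
          = if (x, y) ∈ cs' then ((cs'.length : Int)) else gget 0 filled x y :=
      fun x y hx hy => gget_fillA 0 _ hshF hcs' hx hy
    have hds : ∀ d ∈ PySem.List.dedup (cs'.map (·.2)), 0 ≤ d ∧ d < (m : Int) := by
      intro d hd
      rw [PySem.List.mem_dedup] at hd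
      obtain ⟨p, hp, hpd⟩ := List.mem_map.1 hd
      obtain ⟨_, _, h3, h4⟩ := hcs' p hp
      rw [← hpd]
      exact ⟨h3, h4⟩
    obtain ⟨hblen, hbget⟩ := bump_fold ((cs'.length : Int))
      (PySem.List.dedup (cs'.map (·.2))) (PySem.List.nodup_dedup _) hds cols hclen
    refine loopInv_intro (gshape_fillA _ hshV _) (gshape_fillA _ hshF _) hrel' (by omega) ?_ hblen ?_
    · intro x y hx hxn hy hym
      rw [hgetV x y hx hy, hgetF x y hx hy]
      obtain ⟨hv1, hv2, hv3⟩ := hvals x y hx hxn hy hym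
      by_cases hmem : (x, y) ∈ cs'
      · rw [if_pos hmem, if_pos hmem]
        refine ⟨by omega, by omega, ?_⟩
        constructor
        · intro hz; exact absurd hz hcntne
        · intro hz; omega
      · rw [if_neg hmem, if_neg hmem]
        exact ⟨hv1, by omega, hv3⟩
    · intro c hc
      rw [hbget c hc, hcols c hc]
      have hdelta := scanDelta hcntne hshF hshV hcs' h0' hvals
        (c := (c : Int)) (by omega) (by omega)
      rw [hdelta]
      congr 1
      have : ((c : Int) ∈ PySem.List.dedup (cs'.map (·.2))) ↔ (∃ p ∈ cs', p.2 = (c : Int)) := by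
        rw [PySem.List.mem_dedup, List.mem_map]
      exact if_congr this rfl rfl
  · rw [if_neg hguard, if_neg (fun hb => hguard ⟨hb.1, hgiff.mp hb.2⟩)]
    exact ⟨hshV, hshF, hrelB, hg, hvals, hclen, hcols⟩

-- ===== VERDICT (by name: the statement is the Claim_ definition above) =====
theorem solution_spec : Claim_equal_solution := by
  unfold Claim_equal_solution
  intro land _ _
  unfold Spec_solution
  simp only [solution, solution_alt, Int.toNat_natCast]
  set nN := land.length with hn
  set mN := (PySem.List.pyGetD land 0 []).length with hm
  have hinv0 : LoopInv nN mN
      (List.replicate nN (List.replicate mN 0), List.replicate nN (List.replicate mN 0), 1)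
      (List.replicate nN (List.replicate mN false), List.replicate mN 0) := by
    refine loopInv_intro ⟨by simp, ?_⟩ ⟨by simp, ?_⟩ ?_ le_rfl ?_ (by simp) ?_
    · intro r hr; rw [List.eq_of_mem_replicate hr]; simp
    · intro r hr; rw [List.eq_of_mem_replicate hr]; simp
    · simp [relGrid, List.map_replicate]
    · intro x y _ _ _ _
      rw [gget_zero]
      exact ⟨le_rfl, by omega, Iff.rfl⟩
    · intro c hc
      rw [List.getD_replicate _ hc, colAcc_zero]
  have hfin := foldl_rel (LoopInv nN mN)
    (fun st i =>
      (PySem.List.pyRange 0 (mN : Int)).foldl (fun st j =>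
        match st with
        | (visited, filled, group) =>
          if gget 0 land i j = 1 ∧ gget 0 visited i j = 0 then
            match bfsA i j (nN : Int) (mN : Int) land visited [] group with
            | (count, visited', candidates) => (visited', fillA count filled candidates, group + 1)
          else (visited, filled, group)) st)
    (fun st i =>
      (PySem.List.pyRange 0 (mN : Int)).foldl (fun st j =>
        match st with
        | (visited, cols) =>
          if gget 0 land i j = 1 ∧ gget false visited i j = false then
            match loopB (nN : Int) (mN : Int) land (nN * mN + 1) [(i, j)] 0
                (gset visited i j true) with
            | (cells, visited') =>
              (visited',
                (PySem.List.dedup (cells.map (·.2))).foldl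
                  (fun cols c => bumpB cols c ((cells.length : Int))) cols)
          else (visited, cols)) st)
    (PySem.List.pyRange 0 (nN : Int))
    (by
      intro stA stB i hi hR
      obtain ⟨hi0, hin⟩ := PySem.List.mem_pyRange_one.mp hi
      refine foldl_rel (LoopInv nN mN) _ _ (PySem.List.pyRange 0 (mN : Int)) ?_ stA stB hR
      intro stA stB j hj hR
      obtain ⟨hj0, hjm⟩ := PySem.List.mem_pyRange_one.mp hj
      obtain ⟨visA, filled, group⟩ := stA
      obtain ⟨visB, cols⟩ := stB
      exact body_step land hi0 hin hj0 hjm visA filled group visB cols hR)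
    _ _ hinv0
  set tA := (PySem.List.pyRange 0 (nN : Int)).foldl _
    (List.replicate nN (List.replicate mN (0 : Int)),
      List.replicate nN (List.replicate mN (0 : Int)), (1 : Int)) with htA
  set tB := (PySem.List.pyRange 0 (nN : Int)).foldl _
    (List.replicate nN (List.replicate mN false), List.replicate mN (0 : Int)) with htB
  obtain ⟨_, _, _, _, _, hclen, hcols⟩ := hfin
  unfold findA
  have hansw : (PySem.List.pyRange 0 (mN : Int)).map
      (fun i => (findColA tA.2.1 tA.1 (nN : Int) i).2) = tB.2 := by
    rw [PySem.List.pyRange_zero_natCast, List.map_map]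
    apply List.ext_getElem
    · simp [hclen]
    · intro c h1 h2
      simp only [List.getElem_map, List.getElem_range, Function.comp_apply]
      have hc : c < mN := by simpa using h1
      have := hcols c hc
      rw [List.getD_eq_getElem _ _ h2] at this
      exact this.symm
  rw [hansw]
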